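-- pv_equiv track=rewrite | github.com/dodgerjam/CodeOfAdvent | day19/day19.py | rule0
-- ===== SOURCE A (Python) =====
-- def rule0(value, dict42, dict31, n):
--     if len(value)%n != 0:
--         return False
--     else:
--         i = 0
--         for i in range(n, len(value), n):
--             if rule8(value[:i], dict42,n) and rule11(value[i:], dict42, dict31,n):
--                 return True
--         return False
--
-- def rule8(value, dict42, n):
--     for substring in [value[i:i+n] for i in range(0, len(value), n)]:
--         if substring not in dict42:
--             return False
--     return True
--
-- def rule11(value, dict42, dict31, n):
--     for substring in [value[i:i+n] for i in range(0, len(value)//2, n)]: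
--         if substring not in dict42:
--             return False
--     for substring in [value[i:i+n] for i in range(len(value)//2,len(value), n)]:
--         if substring not in dict31:
--             return False
--     return True
-- ===== SOURCE B (Python) =====
-- def balanced(w, keys42, keys31, n):
--     half = len(w) // 2
--     return (all(w[i:i+n] in keys42 for i in range(0, half, n))
--             and all(w[i:i+n] in keys31 for i in range(half, len(w), n)))
--
-- def rule0(value, dict42, dict31, n):
--     if len(value) % n != 0:
--         return False
--     keys42 = set(dict42)
--     keys31 = set(dict31)
--     chunks = [value[i:i+n] for i in range(0, len(value), n)]
--     p = 0
--     while p < len(chunks) and chunks[p] in keys42: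
--         p += 1
--     return any(balanced(value[q*n:], keys42, keys31, n)
--                for q in range(1, min(p, len(chunks) - 1) + 1))
-- ===== Notes on version B (the rewrite author's own statement) =====
-- stated objective: alternative
-- what changed: B builds the key sets and the aligned chunk list once, computes the longest all-42 chunk prefix in a single scan, and tries only the splits inside that prefix with one direct half-42/half-31 suffix check each, instead of A's per-split rule8 rescan of the whole prefix; Pre_ excludes only n = 0, where both A and B raise ZeroDivisionError on len(value) % n.
import Mathlib
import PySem

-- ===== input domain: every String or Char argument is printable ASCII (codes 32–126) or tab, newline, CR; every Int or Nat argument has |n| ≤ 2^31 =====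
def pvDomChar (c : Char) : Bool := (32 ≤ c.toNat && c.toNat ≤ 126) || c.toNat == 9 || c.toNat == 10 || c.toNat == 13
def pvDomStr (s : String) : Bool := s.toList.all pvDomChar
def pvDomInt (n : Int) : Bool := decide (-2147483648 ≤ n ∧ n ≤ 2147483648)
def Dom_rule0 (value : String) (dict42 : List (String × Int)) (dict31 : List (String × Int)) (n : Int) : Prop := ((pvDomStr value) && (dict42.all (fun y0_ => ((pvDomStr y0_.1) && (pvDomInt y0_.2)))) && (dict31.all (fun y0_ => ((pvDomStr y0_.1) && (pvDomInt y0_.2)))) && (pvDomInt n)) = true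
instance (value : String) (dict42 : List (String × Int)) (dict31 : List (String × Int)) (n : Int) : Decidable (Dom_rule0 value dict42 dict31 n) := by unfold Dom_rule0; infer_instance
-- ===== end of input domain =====

-- ===== PORT A =====
-- B computes each aligned chunk and the longest all-42 chunk prefix once, then tries only the
-- splits inside that prefix, instead of A's per-split rule8 rescan of the whole prefix.
def pvInDict (d : List (String × Int)) (s : String) : Bool := d.any (fun p => p.1 == s)

def pvRule8 (value : String) (dict42 : List (String × Int)) (n : Int) : Bool :=
  ((PySem.List.pyRange 0 (PySem.Str.len value) n).map
      (fun i => PySem.Str.slice value (some i) (some (i + n)))).all (pvInDict dict42)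

def pvRule11 (value : String) (dict42 dict31 : List (String × Int)) (n : Int) : Bool :=
  (((PySem.List.pyRange 0 (PySem.Int.floordiv (PySem.Str.len value) 2) n).map
      (fun i => PySem.Str.slice value (some i) (some (i + n)))).all (pvInDict dict42))
  && (((PySem.List.pyRange (PySem.Int.floordiv (PySem.Str.len value) 2) (PySem.Str.len value) n).map
      (fun i => PySem.Str.slice value (some i) (some (i + n)))).all (pvInDict dict31))

def rule0 (value : String) (dict42 : List (String × Int)) (dict31 : List (String × Int)) (n : Int) : Bool :=
  if PySem.Int.mod (PySem.Str.len value) n ≠ 0 then false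
  else
    (PySem.List.pyRange n (PySem.Str.len value) n).any (fun i =>
      pvRule8 (PySem.Str.slice value none (some i)) dict42 n
      && pvRule11 (PySem.Str.slice value (some i) none) dict42 dict31 n)

-- ===== PORT B =====
def pvBalanced (w : String) (keys42 keys31 : PySem.Set String) (n : Int) : Bool :=
  let half := PySem.Int.floordiv (PySem.Str.len w) 2
  ((PySem.List.pyRange 0 half n).all (fun i =>
      keys42.contains (PySem.Str.slice w (some i) (some (i + n)))))
  && ((PySem.List.pyRange half (PySem.Str.len w) n).all (fun i =>
      keys31.contains (PySem.Str.slice w (some i) (some (i + n)))))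

-- port of Source B's while loop counting the leading chunks found in keys42
def pvPrefixLen : List String → PySem.Set String → Int
  | [], _ => 0
  | c :: rest, k => if k.contains c then 1 + pvPrefixLen rest k else 0

def rule0_alt (value : String) (dict42 : List (String × Int)) (dict31 : List (String × Int)) (n : Int) : Bool :=
  if PySem.Int.mod (PySem.Str.len value) n ≠ 0 then false
  else
    let keys42 : PySem.Set String := PySem.Set.ofList (dict42.map (·.1))
    let keys31 : PySem.Set String := PySem.Set.ofList (dict31.map (·.1))
    let chunks := (PySem.List.pyRange 0 (PySem.Str.len value) n).map
      (fun i => PySem.Str.slice value (some i) (some (i + n)))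
    let p := pvPrefixLen chunks keys42
    (PySem.List.pyRange 1 (min p ((chunks.length : Int) - 1) + 1) 1).any (fun q =>
      pvBalanced (PySem.Str.slice value (some (q * n)) none) keys42 keys31 n)

-- ===== PRECONDITION & SPEC =====
-- Pre_ excludes exactly n = 0, where the Python A raises ZeroDivisionError on len(value) % n.
def Pre_rule0 (value : String) (dict42 : List (String × Int)) (dict31 : List (String × Int)) (n : Int) : Prop := n ≠ 0
instance (value : String) (dict42 : List (String × Int)) (dict31 : List (String × Int)) (n : Int) : Decidable (Pre_rule0 value dict42 dict31 n) := by unfold Pre_rule0; infer_instance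
def pvWitness_rule0 : String × (List (String × Int)) × (List (String × Int)) × Int := ("ababab", [("ab", 1)], [("ab", 2)], 2)

def Spec_rule0 (value : String) (dict42 : List (String × Int)) (dict31 : List (String × Int)) (n : Int) (out : Bool) : Prop := out = rule0_alt value dict42 dict31 n
instance (value : String) (dict42 : List (String × Int)) (dict31 : List (String × Int)) (n : Int) (out : Bool) : Decidable (Spec_rule0 value dict42 dict31 n out) := by unfold Spec_rule0; infer_instance

-- ===== CLAIM (what is proved, stated in full; the proofs are below) =====
def Claim_equal_rule0 : Prop := ∀ (value : String) (dict42 : List (String × Int)) (dict31 : List (String × Int)) (n : Int), Dom_rule0 value dict42 dict31 n → Pre_rule0 value dict42 dict31 n → Spec_rule0 value dict42 dict31 n (rule0 value dict42 dict31 n)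

-- ===== LEMMAS AND PROOFS =====
lemma inKeys_eq_inDict (d : List (String × Int)) (s : String) :
    (PySem.Set.ofList (d.map (·.1))).contains s = pvInDict d s := by
  rw [Bool.eq_iff_iff, PySem.Set.contains_iff, PySem.Set.mem_ofList, pvInDict, List.any_eq_true]
  simp only [List.mem_map, beq_iff_eq]

lemma balanced_eq_rule11 (w : String) (d42 d31 : List (String × Int)) (n : Int) :
    pvBalanced w (PySem.Set.ofList (d42.map (·.1))) (PySem.Set.ofList (d31.map (·.1))) n
      = pvRule11 w d42 d31 n := by
  simp only [pvBalanced, pvRule11, List.all_map]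
  rw [congrArg (List.all _) (funext fun i => inKeys_eq_inDict d42 (PySem.Str.slice w (some i) (some (i + n)))),
    congrArg (List.all _) (funext fun i => inKeys_eq_inDict d31 (PySem.Str.slice w (some i) (some (i + n))))]
  rfl

lemma pvPrefixLen_nonneg (l : List String) (k : PySem.Set String) : 0 ≤ pvPrefixLen l k := by
  induction l with
  | nil => simp [pvPrefixLen]
  | cons c rest ih =>
    rw [pvPrefixLen]
    split_ifs
    · omega
    · omega

lemma prefixLen_ge_iff (l : List String) (k : PySem.Set String) (Q : Nat) (hQ : Q ≤ l.length) :
    ((Q : Int) ≤ pvPrefixLen l k)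
      ↔ ∀ j (hj : j < Q), k.contains (l[j]'(Nat.lt_of_lt_of_le hj hQ)) = true := by
  induction l generalizing Q with
  | nil =>
    have : Q = 0 := by simpa using hQ
    subst this
    simp [pvPrefixLen]
  | cons c rest ih =>
    cases Q with
    | zero =>
      simp [pvPrefixLen_nonneg]
    | succ Q' =>
      rw [pvPrefixLen]
      by_cases hc : k.contains c = true
      · rw [if_pos hc]
        have hQ' : Q' ≤ rest.length := by simpa using hQ
        rw [show ((Q' + 1 : Nat) : Int) ≤ 1 + pvPrefixLen rest k
            ↔ ((Q' : Nat) : Int) ≤ pvPrefixLen rest k by push_cast; omega]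
        rw [ih Q' hQ']
        constructor
        · intro hh j hj
          cases j with
          | zero => simpa using hc
          | succ j' => simpa using hh j' (by omega)
        · intro hh j hj
          simpa using hh (j + 1) (by omega)
      · rw [if_neg hc]
        constructor
        · intro hle
          exfalso
          have : ((Q' + 1 : Nat) : Int) ≥ 1 := by push_cast; omega
          omega
        · intro hh
          exfalso
          exact hc (by simpa using hh 0 (by omega))

lemma str_slice_toList (v : String) (a b : Int) (h0 : 0 ≤ a) (h1 : 0 ≤ b) :
    (PySem.Str.slice v (some a) (some b)).toList
      = (v.toList.drop a.toNat).take (b.toNat - a.toNat) := by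
  rw [PySem.Str.toList_slice, PySem.Chars.slice_eq_listSlice, PySem.List.slice_toNat _ h0 h1]

lemma slice_of_take (v : String) (i x n : Int) (hx : 0 ≤ x) (hn : 0 ≤ n) (h : x + n ≤ i) :
    PySem.Str.slice (PySem.Str.slice v none (some i)) (some x) (some (x + n))
      = PySem.Str.slice v (some x) (some (x + n)) := by
  apply String.toList_inj.mp
  rw [str_slice_toList _ _ _ hx (by omega), str_slice_toList _ _ _ hx (by omega)]
  rw [PySem.Str.toList_slice, PySem.Chars.slice_eq_listSlice, PySem.List.slice_to _ (by omega)]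
  rw [List.drop_take, List.take_take]
  congr 1
  omega

lemma len_slice_take (v : String) (i : Int) (h0 : 0 ≤ i) (h1 : i ≤ (v.toList.length : Int)) :
    PySem.Str.len (PySem.Str.slice v none (some i)) = i := by
  rw [PySem.Str.len_eq, PySem.Str.toList_slice, PySem.Chars.slice_eq_listSlice,
    PySem.List.slice_to _ h0, List.length_take]
  omega

lemma all_slices_iff (w : String) (p : String → Bool) (a b n : Int) (hn : 0 < n) :
    ((((PySem.List.pyRange a b n).map (fun i => PySem.Str.slice w (some i) (some (i + n)))).all p) = true)
    ↔ ∀ i : Int, a ≤ i → i < b → (n ∣ i - a) → p (PySem.Str.slice w (some i) (some (i + n))) = true := by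
  rw [List.all_eq_true]
  constructor
  · intro hh i h1 h2 h3
    exact hh _ (List.mem_map_of_mem ((PySem.List.mem_pyRange_iff_of_pos hn i).mpr ⟨h1, h2, h3⟩))
  · rintro hh s hs
    rw [List.mem_map] at hs
    obtain ⟨i, hi, rfl⟩ := hs
    rw [PySem.List.mem_pyRange_iff_of_pos hn] at hi
    exact hh i hi.1 hi.2.1 hi.2.2

def pvChunkIn (d : List (String × Int)) (v : String) (a N : Nat) : Prop :=
  pvInDict d (PySem.Str.slice v (some ((a : Nat) : Int)) (some (((a : Nat) : Int) + ((N : Nat) : Int)))) = true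

lemma rule8_iff (value : String) (d42 : List (String × Int)) (N Knt Q : Nat)
    (hN : 1 ≤ N) (hL : value.toList.length = Knt * N) (hQK : Q ≤ Knt) :
    (pvRule8 (PySem.Str.slice value none (some ((Q * N : Nat) : Int))) d42 (N : Int) = true)
    ↔ ∀ j, j < Q → pvChunkIn d42 value (j * N) N := by
  have hlen : PySem.Str.len (PySem.Str.slice value none (some ((Q * N : Nat) : Int)))
      = ((Q * N : Nat) : Int) := by
    apply len_slice_take _ _ (by positivity)
    rw [hL]
    exact_mod_cast Nat.mul_le_mul_right N hQK
  rw [pvRule8, hlen, all_slices_iff _ _ _ _ _ (by exact_mod_cast hN)]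
  constructor
  · intro hh j hj
    have h1 : ((j * N : Nat) : Int) + (N : Int) ≤ ((Q * N : Nat) : Int) := by
      push_cast; nlinarith [hN, hj]
    have := hh ((j * N : Nat) : Int) (by positivity)
      (by push_cast; push_cast at h1; nlinarith)
      ⟨(j : Int), by push_cast; ring⟩
    rwa [slice_of_take _ _ _ _ (by positivity) (by positivity) h1] at this
  · intro hh i h0 hb hdvd
    obtain ⟨t, ht⟩ := hdvd
    rw [Int.sub_zero] at ht
    have ht0 : 0 ≤ t := by nlinarith
    set j := t.toNat with hj
    have hjt : (j : Int) = t := Int.toNat_of_nonneg ht0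
    have hi : i = ((j * N : Nat) : Int) := by push_cast; rw [hjt]; linarith
    have hjQ : j < Q := by
      rw [hi] at hb
      push_cast at hb
      by_contra hc
      push_neg at hc
      nlinarith
    have := hh j hjQ
    rw [pvChunkIn] at this
    rw [hi, slice_of_take _ _ _ _ (by positivity) (by positivity)
      (by push_cast; nlinarith)]
    exact this

lemma contains_chunk_iff (value : String) (d : List (String × Int)) (n : Int) (N : Nat)
    (hn' : (N : Int) = n) (j : Nat) :
    ((PySem.Set.ofList (List.map (fun x => x.1) d)).contains
      (PySem.Str.slice value (some (n * (j : Int))) (some (n * (j : Int) + n))) = true)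
    ↔ pvChunkIn d value (j * N) N := by
  rw [inKeys_eq_inDict, pvChunkIn, ← hn']
  have e : ((N : Int) * (j : Int)) = ((j * N : Nat) : Int) := by push_cast; ring
  rw [e]

lemma pyRange_neg_nil (a b s : Int) (hs : s < 0) (h : a ≤ b) : PySem.List.pyRange a b s = [] := by
  simp only [PySem.List.pyRange, if_neg (by omega : ¬ s = 0), if_neg (by omega : ¬ 0 < s),
    if_neg (by omega : ¬ b < a)]
  simp

-- ===== VERDICT (by name: the statement is the Claim_ definition above) =====
theorem rule0_spec : Claim_equal_rule0 := by
  intro value d42 d31 n _ hn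
  unfold Pre_rule0 at hn
  unfold Spec_rule0
  rcases lt_trichotomy n 0 with hneg | hz | hpos
  · rw [rule0, rule0_alt]
    split_ifs with hmod
    · rfl
    · rw [pyRange_neg_nil _ _ _ hneg (by rw [PySem.Str.len_eq]; omega),
        pyRange_neg_nil 0 (PySem.Str.len value) n hneg (by rw [PySem.Str.len_eq]; omega)]
      simp only [List.map_nil, List.any_nil, List.length_nil]
      rw [show min (pvPrefixLen [] (PySem.Set.ofList (d42.map (·.1)))) (((0:Nat) : Int) - 1) + 1
          = 0 by rw [pvPrefixLen]; simp]
      rw [PySem.List.pyRange_one_eq_nil (by norm_num)]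
      rfl
  · exact absurd hz hn
  · rcases eq_or_ne (PySem.Int.mod (PySem.Str.len value) n) 0 with hmod | hmod
    · -- main case: n > 0, n ∣ len
      have hdvd : n ∣ (value.toList.length : Int) := by
        rw [PySem.Str.len_eq] at hmod
        rw [← PySem.Int.mod_eq_zero_iff_dvd]
        exact hmod
      set N : Nat := n.toNat with hN
      have hn' : (N : Int) = n := Int.toNat_of_nonneg (le_of_lt hpos)
      have hN1 : 1 ≤ N := by omega
      set Knt : Nat := value.toList.length / N with hKnt
      have hdvdN : N ∣ value.toList.length := by
        have : ((N : Int)) ∣ (value.toList.length : Int) := by rw [hn']; exact hdvd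
        exact_mod_cast this
      have hL : value.toList.length = Knt * N := by
        rw [hKnt, Nat.div_mul_cancel hdvdN]
      rw [rule0, if_neg (by simpa using hmod), rule0_alt, if_neg (by simpa using hmod)]
      -- the chunk list of B
      have hchunks : (PySem.List.pyRange 0 (PySem.Str.len value) n).map
          (fun i => PySem.Str.slice value (some i) (some (i + n)))
          = (List.range Knt).map
            (fun (j : Nat) => PySem.Str.slice value (some (n * (j : Int))) (some (n * (j : Int) + n))) := by
        rw [PySem.List.pyRange_of_pos _ _ hpos, List.map_map]
        have hcount : (if (0 : Int) < PySem.Str.len value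
            then ((PySem.Str.len value - 0 + n - 1) / n).toNat else 0) = Knt := by
          rw [PySem.Str.len_eq, hL]
          split_ifs with hpos2
          · have hKpos : 0 < Knt := by
              by_contra hc
              push_neg at hc
              interval_cases Knt
              simp at hpos2
            have e1 : ((Knt * N : Nat) : Int) - 0 + n - 1 = (n - 1) + (Knt : Int) * n := by
              rw [← hn']; push_cast; ring
            rw [e1, Int.add_mul_ediv_right _ _ (by omega),
              Int.ediv_eq_zero_of_lt (by omega) (by omega)]
            omega
          · have : ((Knt * N : Nat) : Int) = 0 := by omega
            have : Knt * N = 0 := by exact_mod_cast this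
            have : Knt = 0 := by
              rcases Nat.mul_eq_zero.mp this with h | h
              · exact h
              · omega
            omega
        rw [hcount]
        apply List.map_congr_left
        intro j _
        simp
      simp only [hchunks, List.length_map, List.length_range]
      set chunkF : Nat → String :=
        fun j => PySem.Str.slice value (some (n * (j : Int))) (some (n * (j : Int) + n)) with hcf
      set keys42 : PySem.Set String := PySem.Set.ofList (d42.map (·.1)) with hk42
      set p : Int := pvPrefixLen ((List.range Knt).map chunkF) keys42 with hp
      -- characterize "Q ≤ p" for Q ≤ Knt
      have hpre : ∀ Q : Nat, Q ≤ Knt →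
          (((Q : Int) ≤ p) ↔ ∀ j, j < Q → pvChunkIn d42 value (j * N) N) := by
        intro Q hQK
        rw [hp, prefixLen_ge_iff _ _ Q (by simpa using hQK)]
        constructor
        · intro hh j hj
          have := hh j hj
          rw [List.getElem_map, List.getElem_range] at this
          exact (contains_chunk_iff value d42 n N hn' j).mp this
        · intro hh j hj
          rw [List.getElem_map, List.getElem_range]
          exact (contains_chunk_iff value d42 n N hn' j).mpr (hh j hj)
      rw [Bool.eq_iff_iff, List.any_eq_true, List.any_eq_true]
      constructor
      · rintro ⟨i, hi, hcond⟩
        rw [PySem.List.mem_pyRange_iff_of_pos hpos] at hi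
        obtain ⟨hni, hiL, hdvd2⟩ := hi
        have hdvdi : n ∣ i := by
          have := dvd_add hdvd2 (dvd_refl n)
          simpa using this
        obtain ⟨c, hc⟩ := hdvdi
        have hc1 : 1 ≤ c := by nlinarith
        set Q := c.toNat with hQdef
        have hcQ : (Q : Int) = c := Int.toNat_of_nonneg (by omega)
        have hiQ : i = ((Q * N : Nat) : Int) := by
          push_cast
          rw [hcQ, hn']
          linarith [hc]
        have hQK2 : Q < Knt := by
          rw [PySem.Str.len_eq, hL, hiQ] at hiL
          have : Q * N < Knt * N := by exact_mod_cast hiL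
          exact Nat.lt_of_mul_lt_mul_right this
        have hQ1 : 1 ≤ Q := by omega
        rw [hiQ, Bool.and_eq_true] at hcond
        obtain ⟨h8, h11⟩ := hcond
        rw [← hn'] at h8
        have hQp : (Q : Int) ≤ p := (hpre Q (le_of_lt hQK2)).mpr
          ((rule8_iff value d42 N Knt Q hN1 hL (le_of_lt hQK2)).mp h8)
        refine ⟨(Q : Int), ?_, ?_⟩
        · rw [PySem.List.mem_pyRange_one]
          constructor
          · exact_mod_cast hQ1
          · have h2 : (Q : Int) ≤ (Knt : Int) - 1 := by
              have : (Q : Int) < (Knt : Int) := by exact_mod_cast hQK2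
              omega
            omega
        · rw [balanced_eq_rule11]
          have e : (Q : Int) * n = ((Q * N : Nat) : Int) := by
            rw [← hn']; push_cast; ring
          rw [e]
          exact h11
      · rintro ⟨q, hq, hcond⟩
        rw [PySem.List.mem_pyRange_one] at hq
        obtain ⟨hq1, hq2⟩ := hq
        set Q := q.toNat with hQdef
        have hcQ : (Q : Int) = q := Int.toNat_of_nonneg (by omega)
        have hQ1 : 1 ≤ Q := by omega
        have hqp : q ≤ p := by omega
        have hqK : q ≤ (Knt : Int) - 1 := by omega
        have hQK2 : Q < Knt := by omega
        have h8 : pvRule8 (PySem.Str.slice value none (some ((Q * N : Nat) : Int))) d42 (N : Int)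
            = true := by
          rw [rule8_iff value d42 N Knt Q hN1 hL (le_of_lt hQK2)]
          exact (hpre Q (le_of_lt hQK2)).mp (by omega)
        rw [balanced_eq_rule11] at hcond
        refine ⟨((Q * N : Nat) : Int), ?_, ?_⟩
        · rw [PySem.List.mem_pyRange_iff_of_pos hpos]
          refine ⟨?_, ?_, ⟨(Q : Int) - 1, ?_⟩⟩
          · rw [← hn']
            have : N ≤ Q * N := by nlinarith
            exact_mod_cast this
          · rw [PySem.Str.len_eq, hL]
            have : Q * N < Knt * N := by
              exact (Nat.mul_lt_mul_right (by omega : 0 < N)).mpr hQK2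
            exact_mod_cast this
          · rw [← hn']
            push_cast
            ring
        · rw [Bool.and_eq_true]
          refine ⟨by rw [← hn']; exact h8, ?_⟩
          have e : q * n = ((Q * N : Nat) : Int) := by
            rw [← hcQ, ← hn']; push_cast; ring
          rw [← e]
          exact hcond
    · rw [rule0, rule0_alt]
      simp only [if_pos hmod]
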